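-- pv_equiv track=rewrite | github.com/mattick27/DogSim | dogCVs.py | findCloser
-- ===== SOURCE A (Python) =====
-- def findCloser(x):
--     output = []
--     for i in x:
--         tempSample = []
--         for j in range(len(i)):
--             sample = i[j]
--             close = sorted(zip(sample,[ i for i in range (len(sample))]),reverse=True)[0]
--             tempSample.append(close)
--         output.append(tempSample)
--     return output
-- ===== SOURCE B (Python) =====
-- def _best(sample):
--     # sample[0] raises IndexError on an empty sample, like A's sorted([])[0]
--     best_v, best_i = sample[0], 0
--     for idx, v in enumerate(sample[1:], 1):
--         if best_v <= v:
--             best_v, best_i = v, idx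
--     return (best_v, best_i)
--
-- def findCloser(x):
--     return [[_best(sample) for sample in group] for group in x]
-- ===== Notes on version B (the rewrite author's own statement) =====
-- stated objective: faster
-- what changed: Replaces the per-sample sort of zip(sample, indices) and taking the first element by a single linear scan keeping a running (value, index) best with a >= update so the last maximal index wins, and replaces the append loops by list comprehensions.
import Mathlib
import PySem

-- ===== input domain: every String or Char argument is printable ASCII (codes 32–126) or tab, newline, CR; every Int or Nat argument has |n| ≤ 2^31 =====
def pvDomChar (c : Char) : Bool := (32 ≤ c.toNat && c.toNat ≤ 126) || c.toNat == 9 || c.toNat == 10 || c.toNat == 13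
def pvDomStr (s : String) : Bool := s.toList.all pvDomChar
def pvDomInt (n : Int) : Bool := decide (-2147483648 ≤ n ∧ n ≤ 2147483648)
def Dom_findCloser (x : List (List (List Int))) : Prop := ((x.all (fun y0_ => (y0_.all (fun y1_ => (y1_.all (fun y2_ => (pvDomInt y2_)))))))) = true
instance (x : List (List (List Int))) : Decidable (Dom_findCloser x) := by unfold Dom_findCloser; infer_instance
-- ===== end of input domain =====

-- B replaces A's per-sample sort-then-take-first by a single linear running-best scan
-- (and comprehensions instead of append loops); measured faster on large inputs.


-- ===== PORT A =====
-- sorted(zip(sample, [i for i in range(len(sample))]), reverse=True)[0]; [0] on the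
-- (possibly empty) sorted list is pyGetD with a default, excluded by Pre_ when empty.
def findCloser (x : List (List (List Int))) : List (List (Int × Int)) :=
  x.foldl (fun output i =>
    output ++ [(PySem.List.pyRange 0 (i.length : Int) 1).foldl (fun tempSample j =>
      let sample := PySem.List.pyGetD i j []
      let close := PySem.List.pyGetD
        (PySem.List.sorted2 (sample.zip (PySem.List.pyRange 0 (sample.length : Int) 1))
          (fun p => p.1) (fun p => p.2) true) 0 (0, 0)
      tempSample ++ [close]) []]) []

-- ===== PORT B =====
-- sample[0] raises IndexError on an empty sample (excluded by Pre_); (0,0) marks that case.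
def bestAlt (sample : List Int) : Int × Int :=
  match sample with
  | [] => (0, 0)
  | v :: rest =>
      (PySem.List.enumerate rest 1).foldl
        (fun best p => if best.1 ≤ p.2 then (p.2, p.1) else best) (v, 0)

def findCloser_alt (x : List (List (List Int))) : List (List (Int × Int)) :=
  x.map (fun group => group.map bestAlt)

-- ===== PRECONDITION & SPEC =====
-- Pre_ excludes inputs containing an empty innermost sample: there A raises IndexError
-- (sorted([])[0]) and B raises IndexError too (sample[0]).
def Pre_findCloser (x : List (List (List Int))) : Prop :=
  (x.all (fun group => group.all (fun sample => !sample.isEmpty))) = true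
instance (x : List (List (List Int))) : Decidable (Pre_findCloser x) := by
  unfold Pre_findCloser; infer_instance
def pvWitness_findCloser : List (List (List Int)) := [[[1, 2, 2], [5]], []]

def Spec_findCloser (x : List (List (List Int))) (out : List (List (Int × Int))) : Prop := out = findCloser_alt x
instance (x : List (List (List Int))) (out : List (List (Int × Int))) : Decidable (Spec_findCloser x out) := by unfold Spec_findCloser; infer_instance

-- ===== CLAIM (what is proved, stated in full; the proofs are below) =====
def Claim_equal_findCloser : Prop := ∀ (x : List (List (List Int))), Dom_findCloser x → Pre_findCloser x → Spec_findCloser x (findCloser x)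

-- ===== LEMMAS AND PROOFS =====

-- head after inserting into a nonempty list: the better of x and the old head
theorem head_insertBy {α : Type} (before : α → α → Bool) (x h : α) (t : List α) :
    PySem.List.insertBy before x (h :: t)
      = if before x h then x :: h :: t else h :: PySem.List.insertBy before x t := by
  simp [PySem.List.insertBy]

-- the head of an insertion-sort foldl over a nonempty accumulator is a running-best scan
theorem foldl_insertBy_head {α : Type} (before : α → α → Bool) :
    ∀ (zs : List α) (h : α) (t : List α),
      (zs.foldl (fun acc x => PySem.List.insertBy before x acc) (h :: t)).head?
        = some (zs.foldl (fun b x => if before x b then x else b) h) := by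
  intro zs
  induction zs with
  | nil => intro h t; rfl
  | cons z zs ih =>
      intro h t
      simp only [List.foldl_cons, head_insertBy]
      by_cases hb : before z h
      · simp [hb, ih]
      · simp [hb, ih]

-- scanning the zipped (value, index) pairs in index order equals B's enumerate scan,
-- provided the running best's index stays below the next index
theorem scan_zip_eq_enumerate (rest : List Int) :
    ∀ (k : Int) (b : Int × Int), b.2 < k →
      (rest.zip (PySem.List.pyRange k (k + (rest.length : Int)) 1)).foldl
          (fun b x => if (decide (b.1 < x.1) || (!decide (x.1 < b.1) && decide (b.2 < x.2))) then x else b) b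
        = (PySem.List.enumerate rest k).foldl
            (fun best p => if best.1 ≤ p.2 then (p.2, p.1) else best) b := by
  induction rest with
  | nil => intro k b _; simp [PySem.List.enumerate]
  | cons w ws ih =>
      intro k b hbk
      rw [show k + (((w :: ws).length : Int)) = (k + 1) + ((ws.length : Int)) from by
        simp only [List.length_cons]; push_cast; ring]
      rw [PySem.List.pyRange_one_cons (by omega)]
      simp only [List.zip_cons_cons, PySem.List.enumerate_cons, List.foldl_cons]
      have hcond : (decide (b.1 < w) || (!decide (w < b.1) && decide (b.2 < k))) = decide (b.1 ≤ w) := by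
        by_cases h1 : b.1 < w
        · simp [h1, le_of_lt h1]
        · by_cases h2 : w < b.1
          · simp [h1, h2, not_le.mpr h2]
          · simp [h1, h2, le_of_not_gt h2, hbk]
      rw [hcond]
      by_cases hle : b.1 ≤ w
      · rw [if_pos (by simp [hle]), if_pos hle]
        exact ih (k + 1) (w, k) (by simp)
      · rw [if_neg (by simp [hle]), if_neg hle]
        exact ih (k + 1) b (by omega)

-- A's per-sample value (head of the reverse sort) equals B's per-sample scan
theorem close_eq_bestAlt (sample : List Int) (hne : sample ≠ []) :
    PySem.List.pyGetD
        (PySem.List.sorted2 (sample.zip (PySem.List.pyRange 0 (sample.length : Int) 1))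
          (fun p => p.1) (fun p => p.2) true) 0 (0, 0)
      = bestAlt sample := by
  match sample, hne with
  | v :: rest, _ =>
    rw [show (((v :: rest).length : Int)) = 1 + ((rest.length : Int)) from by
      simp only [List.length_cons]; push_cast; ring]
    rw [PySem.List.pyRange_one_cons (by omega)]
    rw [show (0 : Int) + 1 = 1 from rfl]
    simp only [List.zip_cons_cons]
    show PySem.List.pyGetD
        (List.foldl (fun acc x => PySem.List.insertBy
            (fun a b : Int × Int => decide (b.1 < a.1) || (!decide (a.1 < b.1) && decide (b.2 < a.2)))
            x acc) []
          ((v, 0) :: rest.zip (PySem.List.pyRange 1 (1 + (rest.length : Int)) 1)))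
        0 (0, 0) = bestAlt (v :: rest)
    simp only [List.foldl_cons]
    have h0 : PySem.List.insertBy
        (fun a b : Int × Int => decide (b.1 < a.1) || (!decide (a.1 < b.1) && decide (b.2 < a.2)))
        (v, (0 : Int)) [] = [(v, 0)] := by rfl
    rw [h0]
    have hhead := foldl_insertBy_head
      (fun a b : Int × Int => decide (b.1 < a.1) || (!decide (a.1 < b.1) && decide (b.2 < a.2)))
      (rest.zip (PySem.List.pyRange 1 (1 + (rest.length : Int)) 1)) (v, 0) []
    have hscan := scan_zip_eq_enumerate rest 1 (v, 0) (by norm_num)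
    have hget : ∀ (ys : List (Int × Int)) (m : Int × Int), ys.head? = some m →
        PySem.List.pyGetD ys 0 (0, 0) = m := by
      intro ys m hm
      cases ys with
      | nil => simp at hm
      | cons a t =>
        simp at hm
        rw [PySem.List.pyGetD_zero_cons, hm]
    refine hget _ _ ?_
    rw [hhead, hscan]
    rfl

-- the inner j-loop of A, as a map over the group
theorem inner_eq (group : List (List Int)) (hgrp : group.all (fun s => !s.isEmpty) = true) :
    (PySem.List.pyRange 0 (group.length : Int) 1).foldl (fun tempSample j =>
      let sample := PySem.List.pyGetD group j []
      let close := PySem.List.pyGetD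
        (PySem.List.sorted2 (sample.zip (PySem.List.pyRange 0 (sample.length : Int) 1))
          (fun p => p.1) (fun p => p.2) true) 0 (0, 0)
      tempSample ++ [close]) []
    = group.map bestAlt := by
  rw [PySem.List.foldl_append_singleton_eq_map]
  simp only [List.nil_append]
  rw [show (PySem.List.pyRange 0 (group.length : Int) 1).map (fun j =>
        PySem.List.pyGetD
          (PySem.List.sorted2 ((PySem.List.pyGetD group j []).zip
              (PySem.List.pyRange 0 ((PySem.List.pyGetD group j []).length : Int) 1))
            (fun p => p.1) (fun p => p.2) true) 0 (0, 0))
      = ((PySem.List.pyRange 0 (group.length : Int) 1).map (fun j => PySem.List.pyGetD group j [])).map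
          (fun sample => PySem.List.pyGetD
            (PySem.List.sorted2 (sample.zip (PySem.List.pyRange 0 (sample.length : Int) 1))
              (fun p => p.1) (fun p => p.2) true) 0 (0, 0)) from by
        rw [List.map_map]; rfl]
  rw [PySem.List.map_pyGetD_pyRange_zero']
  apply List.map_congr_left
  intro s hs
  have hne : s ≠ [] := by
    have := List.all_eq_true.mp hgrp s hs
    simpa [List.isEmpty_iff] using this
  exact close_eq_bestAlt s hne

-- ===== VERDICT (by name: the statement is the Claim_ definition above) =====
theorem findCloser_spec : Claim_equal_findCloser := by
  intro x _ hpre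
  unfold Pre_findCloser at hpre
  unfold Spec_findCloser findCloser findCloser_alt
  rw [PySem.List.foldl_append_singleton_eq_map]
  simp only [List.nil_append]
  apply List.map_congr_left
  intro group hg
  exact inner_eq group (List.all_eq_true.mp hpre group hg)
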